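-- pv_equiv track=rewrite | github.com/fernandoBellegarde/Python | FIAP/aulas/capitulo008 - matriz/matriz.py | matriz_com_x
-- ===== SOURCE A (Python) =====
-- def criar_matriz(linhas, colunas):
--     matriz = []
--     for i in range(linhas):
--         linha = []
--         for j in range(colunas):
--             linha.append('.')
--         matriz.append(linha)
--     return matriz
--
-- def matriz_com_x(n):
--     matriz = criar_matriz(n, n)
--     coluna = n - 1
--     for i in range(n):
--         matriz[i][i] = 'z'
--         matriz[i][coluna] = 'z'
--         coluna = coluna - 1
--     return matriz
-- ===== SOURCE B (Python) =====
-- def _metade_superior(n):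
--     # rows 0 .. ceil(n/2)-1, each built by concatenating dot-runs and 'z' segments
--     top = []
--     for i in range((n + 1) // 2):
--         r = n - 1 - i
--         if i == r:
--             row = ['.'] * i + ['z'] + ['.'] * i
--         else:
--             row = ['.'] * i + ['z'] + ['.'] * (r - i - 1) + ['z'] + ['.'] * i
--         top.append(row)
--     return top
--
-- def matriz_com_x(n):
--     # the matrix is symmetric under vertical flip: row n-1-i equals row i,
--     # so the bottom half is the mirror image of the top half
--     top = _metade_superior(n)
--     return top + [list(row) for row in reversed(top[:n // 2])]
-- ===== Notes on version B (the rewrite author's own statement) =====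
-- stated objective: alternative
-- what changed: B constructs only the top half of the matrix, building each row as a concatenation of dot-runs and 'z' segments (no all-dots grid, no overwrite pass, no per-cell test), and obtains the bottom half by mirroring the top rows using the matrix's vertical symmetry.
import Mathlib
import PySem

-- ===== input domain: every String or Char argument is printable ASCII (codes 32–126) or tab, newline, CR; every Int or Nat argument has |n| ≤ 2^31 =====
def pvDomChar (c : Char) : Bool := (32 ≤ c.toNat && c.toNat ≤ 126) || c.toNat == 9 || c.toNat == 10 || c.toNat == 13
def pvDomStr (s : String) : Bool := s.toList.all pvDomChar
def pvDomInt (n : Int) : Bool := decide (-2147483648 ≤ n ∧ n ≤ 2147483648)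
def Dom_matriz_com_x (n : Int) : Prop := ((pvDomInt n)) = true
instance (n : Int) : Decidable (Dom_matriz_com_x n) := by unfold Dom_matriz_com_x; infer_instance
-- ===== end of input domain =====

-- B builds only the top half of the matrix, each row as a concatenation of dot-runs and 'z'
-- segments (no all-dots grid, no overwrite pass), and mirrors the top to get the bottom half.


-- ===== PORT A =====
def criar_matriz (linhas colunas : Int) : List (List String) :=
  (PySem.List.pyRange 0 linhas 1).foldl
    (fun matriz _i =>
      matriz ++ [(PySem.List.pyRange 0 colunas 1).foldl (fun linha _j => linha ++ ["."]) []])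
    []

def matriz_com_x (n : Int) : List (List String) :=
  ((PySem.List.pyRange 0 n 1).foldl
    (fun (st : List (List String) × Int) i =>
      -- matriz[i][i] = 'z'; matriz[i][coluna] = 'z'; coluna = coluna - 1
      let m1 := st.1.modify i.toNat (fun row => row.set i.toNat "z")
      let m2 := m1.modify i.toNat (fun row => row.set st.2.toNat "z")
      (m2, st.2 - 1))
    (criar_matriz n n, n - 1)).1

-- ===== PORT B =====
-- helper = _metade_superior
def pvTopB (n : Int) : List (List String) :=
  (PySem.List.pyRange 0 (PySem.Int.floordiv (n + 1) 2) 1).foldl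
    (fun (top : List (List String)) i =>
      let r := n - 1 - i
      let row :=
        if i = r then
          List.replicate i.toNat "." ++ ["z"] ++ List.replicate i.toNat "."
        else
          List.replicate i.toNat "." ++ ["z"] ++ List.replicate (r - i - 1).toNat "."
            ++ ["z"] ++ List.replicate i.toNat "."
      top ++ [row]) []

def matriz_com_x_alt (n : Int) : List (List String) :=
  let top := pvTopB n
  -- 'top + [list(row) for row in reversed(top[:n//2])]'
  top ++ ((PySem.List.slice top none (some (PySem.Int.floordiv n 2))).reverse.map
    (fun row => row))

-- ===== PRECONDITION & SPEC =====
def Spec_matriz_com_x (n : Int) (out : List (List String)) : Prop := out = matriz_com_x_alt n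
instance (n : Int) (out : List (List String)) : Decidable (Spec_matriz_com_x n out) := by unfold Spec_matriz_com_x; infer_instance

-- ===== CLAIM (what is proved, stated in full; the proofs are below) =====
def Claim_equal_matriz_com_x : Prop := ∀ (n : Int), Dom_matriz_com_x n → Spec_matriz_com_x n (matriz_com_x n)

-- ===== LEMMAS AND PROOFS =====

-- the canonical row/matrix both proofs meet at
def pvRowF (m i : Nat) : List String :=
  (List.range m).map (fun j => if i = j ∨ i + j + 1 = m then "z" else ".")
def pvCanon (m : Nat) : List (List String) := (List.range m).map (pvRowF m)

-- ---- A = canon ----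

-- a row of A's patched grid
def pvRowA (m i : Nat) : List String :=
  ((List.replicate m ".").set i "z").set (m - 1 - i) "z"

theorem pv_foldl_append_const {α β : Type} (r : α) (l : List β) (acc : List α) :
    l.foldl (fun a _ => a ++ [r]) acc = acc ++ List.replicate l.length r := by
  induction l generalizing acc with
  | nil => simp
  | cons x t ih => simp [List.foldl, ih, List.replicate_succ]

theorem pv_criar_eq (n : Int) :
    criar_matriz n n = List.replicate n.toNat (List.replicate n.toNat ".") := by
  unfold criar_matriz
  rw [pv_foldl_append_const, pv_foldl_append_const]
  simp [PySem.List.length_pyRange_one]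

theorem pv_map_range_modify {α : Type} (m k : Nat) (hk : k < m) (f : Nat → α) (g : α → α) :
    ((List.range m).map f).modify k g
      = (List.range m).map (fun i => if i = k then g (f k) else f i) := by
  apply List.ext_getElem
  · simp
  · intro j h1 h2
    have hj : j < m := by simpa using h2
    rw [List.getElem_modify]
    simp only [List.getElem_map, List.getElem_range]
    by_cases h : j = k
    · subst h; simp
    · have h' : ¬ k = j := fun hh => h hh.symm
      simp [h, h']

theorem pv_patch_fold (n : Int) (m : Nat) (hm : m = n.toNat) (hn : 0 < n) (k : Nat) (hk : k ≤ m) :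
    ((List.range k).map (Int.ofNat)).foldl
      (fun (st : List (List String) × Int) i =>
        let m1 := st.1.modify i.toNat (fun row => row.set i.toNat "z")
        let m2 := m1.modify i.toNat (fun row => row.set st.2.toNat "z")
        (m2, st.2 - 1))
      (List.replicate m (List.replicate m "."), n - 1)
    = ((List.range m).map (fun i => if i < k then pvRowA m i else List.replicate m "."),
       n - 1 - k) := by
  induction k with
  | zero => simp [List.map_const']
  | succ k ih =>
    have hk' : k ≤ m := Nat.le_of_succ_le hk
    have hkm : k < m := hk
    rw [List.range_succ, List.map_append, List.foldl_append, ih hk']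
    simp only [List.map_cons, List.map_nil, List.foldl_cons, List.foldl_nil]
    have htoNat : (Int.ofNat k).toNat = k := rfl
    have hcol : (n - 1 - (k : Int)).toNat = m - 1 - k := by omega
    rw [htoNat, hcol]
    rw [pv_map_range_modify m k hkm, pv_map_range_modify m k hkm]
    refine Prod.ext ?_ ?_
    · simp only
      apply List.map_congr_left
      intro i hi
      by_cases h : i = k
      · subst h; simp [pvRowA]
      · have hlt : (i < k + 1) ↔ (i < k) := by omega
        simp [h, hlt]
    · simp only; push_cast; ring

theorem pvRowA_eq (m i : Nat) (hi : i < m) : pvRowA m i = pvRowF m i := by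
  apply List.ext_getElem
  · simp [pvRowA, pvRowF]
  · intro j h1 h2
    have hj : j < m := by simpa [pvRowA] using h1
    simp only [pvRowA, pvRowF, List.getElem_map, List.getElem_range]
    rw [List.getElem_set, List.getElem_set]
    simp only [List.getElem_replicate]
    by_cases h1' : m - 1 - i = j
    · simp [h1', show i = j ∨ i + j + 1 = m by omega]
    · by_cases h2' : i = j
      · simp [h2']
      · simp [h1', h2', show ¬(i + j + 1 = m) by omega]

theorem pv_A_eq_canon (n : Int) : matriz_com_x n = pvCanon n.toNat := by
  by_cases hn : n ≤ 0
  · have hm : n.toNat = 0 := by omega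
    simp [matriz_com_x, pvCanon, hm, criar_matriz, PySem.List.pyRange_one_eq_nil hn]
  · rw [not_le] at hn
    unfold matriz_com_x
    rw [pv_criar_eq, PySem.List.pyRange_one 0 n]
    have hm : ((n : Int) - 0).toNat = n.toNat := by omega
    rw [hm]
    have hrw : (fun k : Nat => (0 : Int) + (k : Int)) = Int.ofNat := by funext k; simp
    rw [hrw, pv_patch_fold n n.toNat rfl hn n.toNat le_rfl]
    simp only [pvCanon]
    apply List.map_congr_left
    intro i hi
    have him : i < n.toNat := List.mem_range.mp hi
    simp only [if_pos him]
    exact pvRowA_eq n.toNat i him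

-- ---- B = canon ----

theorem pvRowB_mid (m k : Nat) (h : 2 * k + 1 = m) :
    List.replicate k "." ++ ["z"] ++ List.replicate k "." = pvRowF m k := by
  apply List.ext_getElem
  · simp [pvRowF]; omega
  · intro j h1 h2
    have hj : j < m := by simpa [pvRowF] using h2
    simp only [pvRowF, List.getElem_map, List.getElem_range]
    simp only [List.getElem_append, List.length_append, List.length_replicate,
      List.length_cons, List.length_nil]
    split_ifs <;> simp_all [List.getElem_replicate] <;> omega

theorem pvRowB_two (m k : Nat) (h : 2 * k + 1 < m) :
    List.replicate k "." ++ ["z"] ++ List.replicate (m - 2 * k - 2) "." ++ ["z"]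
        ++ List.replicate k "." = pvRowF m k := by
  apply List.ext_getElem
  · simp [pvRowF]; omega
  · intro j h1 h2
    have hj : j < m := by simpa [pvRowF] using h2
    simp only [pvRowF, List.getElem_map, List.getElem_range]
    simp only [List.getElem_append, List.length_append, List.length_replicate,
      List.length_cons, List.length_nil]
    split_ifs <;> simp_all [List.getElem_replicate] <;> omega

theorem pvRowF_symm (m k : Nat) (hk : k < m) : pvRowF m (m - 1 - k) = pvRowF m k := by
  apply List.map_congr_left
  intro j hj
  have hjm : j < m := List.mem_range.mp hj
  have : (m - 1 - k = j ∨ m - 1 - k + j + 1 = m) ↔ (k = j ∨ k + j + 1 = m) := by omega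
  rw [if_congr this rfl rfl]

theorem pv_mirror (m : Nat) (g : Nat → List String)
    (hsymm : ∀ k, k < m → g (m - 1 - k) = g k) :
    (List.range ((m + 1) / 2)).map g ++ ((List.range (m / 2)).map g).reverse
      = (List.range m).map g := by
  apply List.ext_getElem
  · simp; omega
  · intro j h1 h2
    have hjm : j < m := by simpa using h2
    rw [List.getElem_append]
    split_ifs with hlt
    · have : j < (m + 1) / 2 := by simpa using hlt
      simp
    · have hge : (m + 1) / 2 ≤ j := by simpa using not_lt.mp hlt
      simp only [List.getElem_reverse, List.getElem_map, List.getElem_range,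
        List.length_map, List.length_range]
      rw [show m / 2 - 1 - (j - (m + 1) / 2) = m - 1 - j by omega]
      exact hsymm j hjm

theorem pv_top_eq (m : Nat) : pvTopB (m : Int) = (List.range ((m + 1) / 2)).map (pvRowF m) := by
  unfold pvTopB
  have hceil : PySem.Int.floordiv ((m : Int) + 1) 2 = (((m + 1) / 2 : Nat) : Int) := by
    exact_mod_cast PySem.Int.floordiv_natCast (m + 1) 2
  rw [hceil, PySem.List.pyRange_zero_natCast, PySem.List.foldl_append_singleton_eq_map,
    List.nil_append, List.map_map]
  apply List.map_congr_left
  intro k hk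
  have hkh : k < (m + 1) / 2 := List.mem_range.mp hk
  simp only [Function.comp_apply]
  by_cases hmid : 2 * k + 1 = m
  · rw [if_pos (by omega : ((k : Nat) : Int) = (m : Int) - 1 - (k : Nat))]
    simpa using pvRowB_mid m k hmid
  · have hlt : 2 * k + 1 < m := by omega
    rw [if_neg (by omega : ¬ ((k : Nat) : Int) = (m : Int) - 1 - (k : Nat))]
    have hmm : ((m : Int) - 1 - (k : Nat) - (k : Nat) - 1).toNat = m - 2 * k - 2 := by omega
    rw [hmm]
    simpa using pvRowB_two m k hlt

theorem pv_B_eq_canon (n : Int) : matriz_com_x_alt n = pvCanon n.toNat := by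
  by_cases hn : n ≤ 0
  · have hnil : PySem.List.pyRange 0 (PySem.Int.floordiv (n + 1) 2) 1 = [] := by
      refine PySem.List.pyRange_one_eq_nil ?_
      have h2 : PySem.Int.floordiv (n + 1) 2 < 1 :=
        (PySem.Int.floordiv_lt_iff_lt_mul (by omega)).mpr (by omega)
      omega
    have hm : n.toNat = 0 := by omega
    unfold matriz_com_x_alt pvTopB
    rw [hnil]
    simp [pvCanon, hm, PySem.List.slice]
  · rw [not_le] at hn
    have hnm : n = ((n.toNat : Nat) : Int) := by omega
    set m := n.toNat with hmdef
    unfold matriz_com_x_alt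
    rw [hnm, pv_top_eq m]
    have hfl : PySem.Int.floordiv (m : Int) 2 = (((m / 2 : Nat)) : Int) := by
      exact_mod_cast PySem.Int.floordiv_natCast m 2
    rw [hfl]
    simp only [PySem.List.slice_to_natCast, ← List.map_take, List.take_range, List.map_id']
    have hmin : min (m / 2) ((m + 1) / 2) = m / 2 := by omega
    rw [hmin, pvCanon]
    exact pv_mirror m (pvRowF m) (fun k hk => pvRowF_symm m k hk)

-- ===== VERDICT (by name: the statement is the Claim_ definition above) =====
theorem matriz_com_x_spec : Claim_equal_matriz_com_x := by
  intro n _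
  unfold Spec_matriz_com_x
  rw [pv_A_eq_canon, pv_B_eq_canon]
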